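-- pv_equiv track=rewrite | github.com/Xue-Yuan/LeetCode-Python | coursera magical number.py | solution
-- ===== SOURCE A (Python) =====
-- def is_magical(s, beg, end, m):
--     if (beg, end) in m:
--         return m[(beg, end)]
--     cnt = 0
--     for i in range(beg, end):
--         cnt += 1 if s[i] == '1' else -1
--         if cnt < 0:
--             m[(beg, end)] = False
--             return False
--     m[(beg, end)] = cnt == 0
--     return cnt == 0
--
-- def solution(s):
--     m = {}
--     ans, sz = s, len(s)
--     for beg in range(0, sz):
--         for mid in range(beg+1, sz):
--             for end in range(mid+1, sz):
--                 if (s[beg:end] < s[mid:end]+s[beg:mid] and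
--                         is_magical(s, beg, mid, m) and
--                         is_magical(s, mid, end, m)):
--                     ans = max(ans, s[:beg]+s[mid:end]+s[beg:mid]+s[end:])
--     return ans
-- ===== SOURCE B (Python) =====
-- def solution(s):
--     n = len(s)
--     pre = [0]
--     for c in s:
--         pre.append(pre[-1] + (1 if c == '1' else -1))
--
--     def magical(a, b):
--         return pre[a] == pre[b] and min(pre[a + 1:b + 1]) >= pre[a]
--
--     ans = s
--     for beg in range(0, n):
--         for mid in range(beg + 1, n):
--             for end in range(mid + 1, n):
--                 if (s[beg:end] < s[mid:end] + s[beg:mid]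
--                         and magical(beg, mid) and magical(mid, end)):
--                     cand = s[:beg] + s[mid:end] + s[beg:mid] + s[end:]
--                     if cand > ans:
--                         ans = cand
--     return ans
-- ===== Notes on version B (the rewrite author's own statement) =====
-- stated objective: simpler
-- what changed: A's memoized per-interval balance scans (a dict threaded through the triple loop, each half rescanned on a miss) are replaced by one prefix-balance table built in a single pass, each half then tested as pre[a]==pre[b] and min(pre[a+1:b+1])>=pre[a]; the memo dict disappears entirely.
import Mathlib
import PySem

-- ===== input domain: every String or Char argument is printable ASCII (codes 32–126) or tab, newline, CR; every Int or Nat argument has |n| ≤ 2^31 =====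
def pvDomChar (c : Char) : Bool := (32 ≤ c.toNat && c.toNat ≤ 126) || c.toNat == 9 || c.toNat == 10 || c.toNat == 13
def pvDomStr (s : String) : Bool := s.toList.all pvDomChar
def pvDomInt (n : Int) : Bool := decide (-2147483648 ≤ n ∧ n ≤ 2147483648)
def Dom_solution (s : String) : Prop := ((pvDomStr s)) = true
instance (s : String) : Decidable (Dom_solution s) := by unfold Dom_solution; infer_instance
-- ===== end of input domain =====

-- B replaces A's memoized per-query balance scans with a prefix-balance table built once,
-- each half then tested against that table; same return value (objective: simpler).

-- ===== PORT A =====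
-- the inner loop of is_magical: running count, early False on a negative prefix
def pvMagCnt (l : List Char) (idxs : List Int) (cnt : Int) : Bool :=
  match idxs with
  | [] => cnt == 0
  | i :: rest =>
      let cnt' := cnt + (if PySem.List.pyGet? l i = some '1' then 1 else -1)
      if cnt' < 0 then false else pvMagCnt l rest cnt'

-- is_magical(s, beg, end, m): memo lookup, else scan and store the result
def pvIsMagical (l : List Char) (beg fin : Int) (m : PySem.Dict (Int × Int) Bool) :
    Bool × PySem.Dict (Int × Int) Bool :=
  match m.get? (beg, fin) with
  | some v => (v, m)
  | none =>
      let r := pvMagCnt l (PySem.List.pyRange beg fin) 0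
      (r, m.insert (beg, fin) r)

-- body of A's innermost loop: the `and`-chain short-circuits, so the memo is only
-- consulted/updated when the earlier conjuncts are true, and ans = max(ans, cand)
def pvStepA (l : List Char) (beg mid fin : Int)
    (st : List Char × PySem.Dict (Int × Int) Bool) : List Char × PySem.Dict (Int × Int) Bool :=
  if PySem.Chars.strLt (PySem.List.slice l (some beg) (some fin))
      (PySem.List.slice l (some mid) (some fin) ++ PySem.List.slice l (some beg) (some mid)) then
    let r1 := pvIsMagical l beg mid st.2
    if r1.1 then
      let r2 := pvIsMagical l mid fin r1.2
      if r2.1 then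
        let cand := PySem.List.slice l none (some beg) ++ PySem.List.slice l (some mid) (some fin)
          ++ PySem.List.slice l (some beg) (some mid) ++ PySem.List.slice l (some fin) none
        (if st.1 < cand then cand else st.1, r2.2)
      else (st.1, r2.2)
    else (st.1, r1.2)
  else st

def solution (s : String) : String :=
  let l := s.toList
  let sz : Int := l.length
  String.ofList ((PySem.List.pyRange 0 sz).foldl (fun st beg =>
    (PySem.List.pyRange (beg+1) sz).foldl (fun st mid =>
      (PySem.List.pyRange (mid+1) sz).foldl (fun st fin =>
        pvStepA l beg mid fin st) st) st) (l, PySem.Dict.empty)).1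

-- ===== PORT B =====
-- pre = [0]; for c in s: pre.append(pre[-1] + (1 if c == '1' else -1))
def pvPre (cs : List Char) (acc : Int) : List Int :=
  match cs with
  | [] => [acc]
  | c :: rest => acc :: pvPre rest (acc + if c = '1' then 1 else -1)

-- magical(a, b) = pre[a] == pre[b] and min(pre[a+1:b+1]) >= pre[a]
-- (min() of an empty slice raises in Python; solution_alt only calls it with a < b,
-- so that branch is unreachable there and the port returns false in it)
def pvMagB (pre : List Int) (a b : Int) : Bool :=
  match PySem.List.pyGet? pre a, PySem.List.pyGet? pre b,
        PySem.List.min? (PySem.List.slice pre (some (a+1)) (some (b+1))) (fun x => x) with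
  | some pa, some pb, some mn => pa == pb && decide (pa ≤ mn)
  | _, _, _ => false

def pvStepB (l : List Char) (pre : List Int) (beg mid fin : Int) (ans : List Char) : List Char :=
  if PySem.Chars.strLt (PySem.List.slice l (some beg) (some fin))
      (PySem.List.slice l (some mid) (some fin) ++ PySem.List.slice l (some beg) (some mid))
      && pvMagB pre beg mid && pvMagB pre mid fin then
    let cand := PySem.List.slice l none (some beg) ++ PySem.List.slice l (some mid) (some fin)
      ++ PySem.List.slice l (some beg) (some mid) ++ PySem.List.slice l (some fin) none
    if ans < cand then cand else ans
  else ans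

def solution_alt (s : String) : String :=
  let l := s.toList
  let sz : Int := l.length
  let pre := pvPre l 0
  String.ofList ((PySem.List.pyRange 0 sz).foldl (fun ans beg =>
    (PySem.List.pyRange (beg+1) sz).foldl (fun ans mid =>
      (PySem.List.pyRange (mid+1) sz).foldl (fun ans fin =>
        pvStepB l pre beg mid fin ans) ans) ans) l)

-- ===== PRECONDITION & SPEC =====
def Spec_solution (s : String) (out : String) : Prop := out = solution_alt s
instance (s : String) (out : String) : Decidable (Spec_solution s out) := by unfold Spec_solution; infer_instance

-- ===== CLAIM (what is proved, stated in full; the proofs are below) =====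
def Claim_equal_solution : Prop := ∀ (s : String), Dom_solution s → Spec_solution s (solution s)

-- ===== LEMMAS AND PROOFS =====

-- prefix balance of the first k characters
def pvPf (l : List Char) (k : Nat) : Int :=
  ((l.take k).map (fun c => if c = '1' then 1 else -1)).sum

-- memo invariant: every stored value is the value the scan would compute
def pvMinv (l : List Char) (m : PySem.Dict (Int × Int) Bool) : Prop :=
  ∀ p v, m.get? p = some v → v = pvMagCnt l (PySem.List.pyRange p.1 p.2) 0

-- pure (memo-free) step with A's scan-based test
def pvStepP (l : List Char) (beg mid fin : Int) (ans : List Char) : List Char :=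
  if PySem.Chars.strLt (PySem.List.slice l (some beg) (some fin))
      (PySem.List.slice l (some mid) (some fin) ++ PySem.List.slice l (some beg) (some mid))
      && pvMagCnt l (PySem.List.pyRange beg mid) 0 && pvMagCnt l (PySem.List.pyRange mid fin) 0 then
    let cand := PySem.List.slice l none (some beg) ++ PySem.List.slice l (some mid) (some fin)
      ++ PySem.List.slice l (some beg) (some mid) ++ PySem.List.slice l (some fin) none
    if ans < cand then cand else ans
  else ans

theorem pvPf_succ (l : List Char) (k : Nat) (hk : k < l.length) :
    pvPf l (k+1) = pvPf l k + (if l[k] = '1' then 1 else -1) := by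
  have h : l.take (k+1) = l.take k ++ [l[k]] := by
    rw [List.take_add_one, List.getElem?_eq_getElem hk]; rfl
  unfold pvPf
  rw [h, List.map_append, List.sum_append]
  simp

theorem pvMagCnt_spec (l : List Char) (a b : Nat) (cnt : Int)
    (hab : a ≤ b) (hb : b ≤ l.length) :
    pvMagCnt l (PySem.List.pyRange a b) cnt =
      decide ((∀ j : Nat, j ≤ b → a < j → 0 ≤ cnt + pvPf l j - pvPf l a)
        ∧ cnt + pvPf l b - pvPf l a = 0) := by
  obtain ⟨d, rfl⟩ : ∃ d, b = a + d := ⟨b - a, by omega⟩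
  clear hab
  induction d generalizing a cnt with
  | zero =>
    rw [Nat.add_zero] at *
    rw [PySem.List.pyRange_one_eq_nil (le_refl _)]
    have hiff : ((∀ j : Nat, j ≤ a → a < j → 0 ≤ cnt + pvPf l j - pvPf l a)
        ∧ cnt + pvPf l a - pvPf l a = 0) ↔ (cnt = 0) := by
      constructor
      · rintro ⟨_, h2⟩; omega
      · intro h; exact ⟨fun j h1 h2 => absurd h2 (by omega), by omega⟩
    rw [decide_eq_decide.mpr hiff]
    simp only [pvMagCnt]
    exact Bool.beq_eq_decide_eq cnt 0
  | succ d ih =>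
    have ha : a < l.length := by omega
    rw [PySem.List.pyRange_one_cons (by exact_mod_cast Nat.lt_add_of_pos_right (Nat.succ_pos d))]
    simp only [pvMagCnt, PySem.List.pyGet?_natCast, List.getElem?_eq_getElem ha,
      Option.some_inj]
    have hc : cnt + (if l[a] = '1' then 1 else -1) = cnt + pvPf l (a+1) - pvPf l a := by
      rw [pvPf_succ l a ha]; ring
    rw [hc]
    set cnt' := cnt + pvPf l (a+1) - pvPf l a with hcnt'
    by_cases hneg : cnt' < 0
    · rw [if_pos hneg]
      have : ¬ ((∀ j : Nat, j ≤ a + (d+1) → a < j → 0 ≤ cnt + pvPf l j - pvPf l a)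
          ∧ cnt + pvPf l (a + (d+1)) - pvPf l a = 0) := by
        rintro ⟨h1, _⟩
        have := h1 (a+1) (by omega) (by omega)
        omega
      symm
      simpa only [decide_eq_false_iff_not] using this
    · rw [if_neg hneg]
      rw [show ((a:Nat) + 1 : Int) = ((a+1 : Nat) : Int) by push_cast; ring]
      rw [show (a + (d+1) : Nat) = ((a+1) + d : Nat) by omega] at *
      rw [ih (a+1) cnt' (by omega)]
      congr 1
      apply propext
      constructor
      · rintro ⟨h1, h2⟩
        refine ⟨fun j hj1 hj2 => ?_, by omega⟩
        rcases Nat.lt_or_ge (a+1) j with h | h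
        · have := h1 j hj1 h; omega
        · have hj : j = a + 1 := by omega
          subst hj; omega
      · rintro ⟨h1, h2⟩
        refine ⟨fun j hj1 hj2 => ?_, by omega⟩
        have := h1 j hj1 (by omega); omega

theorem pvPre_length (cs : List Char) (acc : Int) : (pvPre cs acc).length = cs.length + 1 := by
  induction cs generalizing acc with
  | nil => rfl
  | cons c rest ih => simp [pvPre, ih]

theorem pvPre_get (cs : List Char) (acc : Int) (k : Nat) (hk : k ≤ cs.length) :
    (pvPre cs acc)[k]? = some (acc + pvPf cs k) := by
  induction cs generalizing acc k with
  | nil => simp at hk; subst hk; simp [pvPre, pvPf]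
  | cons c rest ih =>
    cases k with
    | zero => simp [pvPre, pvPf]
    | succ k =>
      simp only [pvPre, List.getElem?_cons_succ]
      rw [ih _ k (by simpa using hk)]
      simp [pvPf, List.take_succ_cons]
      ring

theorem pvMagB_spec (l : List Char) (a b : Nat) (hab : a < b) (hb : b ≤ l.length) :
    pvMagB (pvPre l 0) a b =
      decide (pvPf l a = pvPf l b ∧ ∀ j : Nat, j ≤ b → a < j → pvPf l a ≤ pvPf l j) := by
  set pre := pvPre l 0 with hpre
  have hlen : pre.length = l.length + 1 := pvPre_length l 0
  have hget : ∀ k : Nat, k ≤ l.length → pre[k]? = some (pvPf l k) := by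
    intro k hk; rw [hpre, pvPre_get l 0 k hk, zero_add]
  have hga : PySem.List.pyGet? pre (a : Int) = some (pvPf l a) := by
    rw [PySem.List.pyGet?_natCast]; exact hget a (by omega)
  have hgb : PySem.List.pyGet? pre (b : Int) = some (pvPf l b) := by
    rw [PySem.List.pyGet?_natCast]; exact hget b (by omega)
  have hsl : PySem.List.slice pre (some ((a : Int)+1)) (some ((b : Int)+1))
      = (pre.drop (a+1)).take (b-a) := by
    rw [show ((a : Int)+1) = ((a+1 : Nat) : Int) by push_cast; ring,
        show ((b : Int)+1) = ((b+1 : Nat) : Int) by push_cast; ring,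
        PySem.List.slice_natCast]
    congr 1; omega
  set xs := (pre.drop (a+1)).take (b-a) with hxs
  have hxlen : xs.length = b - a := by
    rw [hxs, List.length_take, List.length_drop, hlen]; omega
  have hmem : ∀ y, y ∈ xs ↔ ∃ k : Nat, a < k ∧ k ≤ b ∧ y = pvPf l k := by
    intro y
    rw [List.mem_iff_getElem?]
    constructor
    · rintro ⟨i, hi⟩
      have hilt : i < b - a := by
        by_contra hge
        rw [List.getElem?_eq_none_iff.mpr (by omega)] at hi; simp at hi
      rw [hxs, List.getElem?_take, if_pos hilt, List.getElem?_drop,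
        hget (a+1+i) (by omega)] at hi
      exact ⟨a+1+i, by omega, by omega, by exact (Option.some_inj.mp hi).symm⟩
    · rintro ⟨k, hk1, hk2, rfl⟩
      refine ⟨k - a - 1, ?_⟩
      rw [hxs, List.getElem?_take, if_pos (by omega), List.getElem?_drop,
        show a + 1 + (k - a - 1) = k by omega, hget k (by omega)]
  have hne : xs ≠ [] := by
    intro h; rw [h] at hxlen; simp at hxlen; omega
  obtain ⟨mn, hmn⟩ : ∃ mn, PySem.List.min? xs (fun x => x) = some mn := by
    cases h : PySem.List.min? xs (fun x => x) with
    | none => exact absurd ((PySem.List.min?_eq_none_iff xs fun x => x).mp h) hne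
    | some mn => exact ⟨mn, rfl⟩
  have hmin : (pvPf l a ≤ mn) ↔ (∀ j : Nat, j ≤ b → a < j → pvPf l a ≤ pvPf l j) := by
    constructor
    · intro h j hj1 hj2
      have hj : pvPf l j ∈ xs := (hmem _).mpr ⟨j, hj2, hj1, rfl⟩
      exact le_trans h (PySem.List.min?_isMin hmn _ hj)
    · intro h
      obtain ⟨k, hk1, hk2, rfl⟩ := (hmem mn).mp (PySem.List.min?_mem hmn)
      exact h k hk2 hk1
  unfold pvMagB
  rw [hga, hgb, hsl, hmn]
  simp only [Bool.beq_eq_decide_eq]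
  rw [show (decide (pvPf l a ≤ mn)) = decide (∀ j : Nat, j ≤ b → a < j → pvPf l a ≤ pvPf l j)
    from decide_eq_decide.mpr hmin]
  simp

theorem pvMag_eq (l : List Char) (a b : Int) (h0 : 0 ≤ a) (hab : a < b) (hb : b ≤ (l.length : Int)) :
    pvMagCnt l (PySem.List.pyRange a b) 0 = pvMagB (pvPre l 0) a b := by
  obtain ⟨a', rfl⟩ : ∃ a' : Nat, a = (a' : Int) := ⟨a.toNat, by omega⟩
  obtain ⟨b', rfl⟩ : ∃ b' : Nat, b = (b' : Int) := ⟨b.toNat, by omega⟩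
  have hab' : a' < b' := by exact_mod_cast hab
  have hb' : b' ≤ l.length := by exact_mod_cast hb
  rw [pvMagCnt_spec l a' b' 0 (by omega) hb', pvMagB_spec l a' b' hab' hb']
  apply decide_eq_decide.mpr
  constructor
  · rintro ⟨h1, h2⟩
    exact ⟨by omega, fun j hj1 hj2 => by have := h1 j hj1 hj2; omega⟩
  · rintro ⟨h1, h2⟩
    exact ⟨fun j hj1 hj2 => by have := h2 j hj1 hj2; omega, by omega⟩

theorem pvIsMagical_spec (l : List Char) (a b : Int) (m : PySem.Dict (Int × Int) Bool)
    (hm : pvMinv l m) :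
    (pvIsMagical l a b m).1 = pvMagCnt l (PySem.List.pyRange a b) 0
      ∧ pvMinv l (pvIsMagical l a b m).2 := by
  unfold pvIsMagical
  cases h : m.get? (a, b) with
  | some v =>
    exact ⟨hm (a, b) v h, hm⟩
  | none =>
    refine ⟨rfl, ?_⟩
    intro p v hpv
    rw [PySem.Dict.get?_insert] at hpv
    split at hpv
    · rename_i hp
      subst hp
      exact (Option.some_inj.mp hpv).symm
    · exact hm p v hpv

theorem pvStepA_spec (l : List Char) (beg mid fin : Int)
    (st : List Char × PySem.Dict (Int × Int) Bool) (hm : pvMinv l st.2) :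
    (pvStepA l beg mid fin st).1 = pvStepP l beg mid fin st.1
      ∧ pvMinv l (pvStepA l beg mid fin st).2 := by
  unfold pvStepA pvStepP
  by_cases hsl : PySem.Chars.strLt (PySem.List.slice l (some beg) (some fin))
      (PySem.List.slice l (some mid) (some fin) ++ PySem.List.slice l (some beg) (some mid))
  · obtain ⟨h1a, h1b⟩ := pvIsMagical_spec l beg mid st.2 hm
    obtain ⟨h2a, h2b⟩ := pvIsMagical_spec l mid fin (pvIsMagical l beg mid st.2).2 h1b
    rw [hsl]
    simp only [Bool.true_and]
    by_cases hb1 : (pvIsMagical l beg mid st.2).1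
    · rw [if_pos hb1]
      rw [hb1] at h1a
      rw [← h1a]
      simp only [Bool.true_and]
      by_cases hb2 : (pvIsMagical l mid fin (pvIsMagical l beg mid st.2).2).1
      · rw [if_pos hb2]
        rw [hb2] at h2a
        rw [← h2a]
        simp only [if_true]
        exact ⟨by trivial, h2b⟩
      · rw [if_neg hb2]
        rw [← h2a]
        simp only [Bool.not_eq_true] at hb2
        rw [hb2]
        simp only [Bool.false_eq_true, if_false]
        exact ⟨by trivial, h2b⟩
    · rw [if_neg hb1]
      simp only [Bool.not_eq_true] at hb1
      rw [hb1] at h1a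
      rw [← h1a]
      simp only [Bool.false_and, Bool.false_eq_true, if_false]
      exact ⟨by trivial, h1b⟩
  · rw [if_neg hsl]
    simp only [Bool.not_eq_true] at hsl
    rw [hsl]
    simp only [Bool.false_and, Bool.false_eq_true, if_false]
    exact ⟨by trivial, hm⟩

theorem pvFold_spec (l : List Char)
    (F : (List Char × PySem.Dict (Int × Int) Bool) → Int → (List Char × PySem.Dict (Int × Int) Bool))
    (G : List Char → Int → List Char)
    (h : ∀ st x, pvMinv l st.2 → (F st x).1 = G st.1 x ∧ pvMinv l (F st x).2)
    (es : List Int) (st : List Char × PySem.Dict (Int × Int) Bool) (hm : pvMinv l st.2) :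
    (es.foldl F st).1 = es.foldl G st.1 ∧ pvMinv l (es.foldl F st).2 := by
  induction es generalizing st with
  | nil => exact ⟨rfl, hm⟩
  | cons x rest ih =>
    obtain ⟨h1, h2⟩ := h st x hm
    obtain ⟨h3, h4⟩ := ih (F st x) h2
    rw [List.foldl_cons, List.foldl_cons, h3, h1]
    exact ⟨rfl, h4⟩

theorem pvMinv_empty (l : List Char) : pvMinv l PySem.Dict.empty := by
  intro p v h
  rw [PySem.Dict.get?_empty] at h
  simp at h

theorem pvSolution_pure (s : String) :
    solution s = String.ofList ((PySem.List.pyRange 0 (s.toList.length : Int)).foldl (fun ans beg =>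
      (PySem.List.pyRange (beg+1) (s.toList.length : Int)).foldl (fun ans mid =>
        (PySem.List.pyRange (mid+1) (s.toList.length : Int)).foldl (fun ans fin =>
          pvStepP s.toList beg mid fin ans) ans) ans) s.toList) := by
  unfold solution
  refine congrArg String.ofList ?_
  exact (pvFold_spec s.toList _ _
    (fun st beg hmm => pvFold_spec s.toList _ _
      (fun st2 mid hmm2 => pvFold_spec s.toList _ _
        (fun st3 fin hmm3 => pvStepA_spec s.toList beg mid fin st3 hmm3) _ st2 hmm2)
      _ st hmm)
    _ (s.toList, PySem.Dict.empty) (pvMinv_empty s.toList)).1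

theorem pvStep_eq (l : List Char) (beg mid fin : Int)
    (h0 : 0 ≤ beg) (h1 : beg < mid) (h2 : mid < fin) (h3 : fin ≤ (l.length : Int))
    (ans : List Char) :
    pvStepP l beg mid fin ans = pvStepB l (pvPre l 0) beg mid fin ans := by
  unfold pvStepP pvStepB
  rw [pvMag_eq l beg mid h0 h1 (by omega), pvMag_eq l mid fin (by omega) h2 h3]

-- ===== VERDICT (by name: the statement is the Claim_ definition above) =====
theorem solution_spec : Claim_equal_solution := by
  intro s _
  unfold Spec_solution
  rw [pvSolution_pure]
  unfold solution_alt
  refine congrArg String.ofList ?_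
  apply PySem.List.foldl_congr_mem
  intro a1 beg hbeg
  apply PySem.List.foldl_congr_mem
  intro a2 mid hmid
  apply PySem.List.foldl_congr_mem
  intro a3 fin hfin
  rw [PySem.List.mem_pyRange_one] at hbeg hmid hfin
  exact pvStep_eq s.toList beg mid fin (by omega) (by omega) (by omega) (by omega) a3
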